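-- pv_equiv track=rewrite | github.com/gusta-bib/itu-marc-creator | main.py | capitalize_name
-- ===== SOURCE A (Python) =====
-- def capitalize_name(name):
--     turkish_upper = {"i": "İ", "ı": "I"}
--     turkish_lower = {"İ": "i", "I": "ı"}
--     def capitalize_word(word):
--         if not word:
--             return ""
--         first_letter = turkish_upper.get(word[0], word[0].upper())
--         rest_of_word = "".join([turkish_lower.get(char, char.lower()) for char in word[1:]])
--         return first_letter + rest_of_word
--     return " ".join(capitalize_word(part) for part in name.split())
-- ===== SOURCE B (Python) =====
-- def capitalize_name(name):
--     turkish_upper = {"i": "İ", "ı": "I"}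
--     turkish_lower = {"İ": "i", "I": "ı"}
--     out = []
--     at_start = True
--     for ch in name:
--         if ch.isspace():
--             at_start = True
--         else:
--             if at_start and out:
--                 out.append(" ")
--             out.append(turkish_upper.get(ch, ch.upper()) if at_start
--                        else turkish_lower.get(ch, ch.lower()))
--             at_start = False
--     return "".join(out)
-- ===== Notes on version B (the rewrite author's own statement) =====
-- stated objective: alternative
-- what changed: B replaces A's split-into-words / per-word capitalize / join pipeline by one fused left-to-right character scan with an at-word-start flag, emitting the separator and mapped characters directly without ever materialising the word list.
import Mathlib
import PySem

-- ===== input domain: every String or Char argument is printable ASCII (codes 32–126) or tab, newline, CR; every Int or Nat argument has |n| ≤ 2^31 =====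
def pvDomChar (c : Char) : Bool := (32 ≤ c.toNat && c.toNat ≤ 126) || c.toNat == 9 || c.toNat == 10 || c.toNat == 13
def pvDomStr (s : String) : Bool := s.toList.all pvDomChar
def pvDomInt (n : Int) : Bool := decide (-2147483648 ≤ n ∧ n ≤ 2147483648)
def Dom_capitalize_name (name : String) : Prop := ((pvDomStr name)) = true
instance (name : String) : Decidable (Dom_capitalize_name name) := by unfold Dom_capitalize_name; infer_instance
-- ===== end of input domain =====

-- B replaces A's split-words / capitalize-each / join pipeline by one fused character scan
-- with an at-word-start flag (objective: alternative algorithm, same return value).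

-- ===== PORT A =====
-- turkish_upper.get(c, c.upper()) on a single character (shared by both ports: both Pythons use the same dicts)
def tuUpper (c : Char) : Char :=
  if c = 'i' then 'İ' else if c = 'ı' then 'I' else PySem.Chars.upperChar c
-- turkish_lower.get(c, c.lower()) on a single character
def tuLower (c : Char) : Char :=
  if c = 'İ' then 'i' else if c = 'I' then 'ı' else PySem.Chars.lowerChar c
-- capitalize_word: uppercase the first char, lowercase the rest
def capWordA (w : List Char) : List Char :=
  match w with
  | [] => []
  | c :: rest => tuUpper c :: rest.map tuLower

def capitalize_name (name : String) : String :=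
  String.ofList (PySem.Chars.join [' '] ((PySem.Chars.split₀ name.toList).map capWordA))

-- ===== PORT B =====
-- one step of B's for-loop: state = (out so far, at_start flag)
def stepB (st : List Char × Bool) (c : Char) : List Char × Bool :=
  if PySem.Chars.isspace c then (st.1, true)
  else
    let out1 := if st.2 && !st.1.isEmpty then st.1 ++ [' '] else st.1
    (out1 ++ [if st.2 then tuUpper c else tuLower c], false)

def capitalize_name_alt (name : String) : String :=
  String.ofList (name.toList.foldl stepB ([], true)).1

-- ===== PRECONDITION & SPEC =====
def Spec_capitalize_name (name : String) (out : String) : Prop := out = capitalize_name_alt name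
instance (name : String) (out : String) : Decidable (Spec_capitalize_name name out) := by unfold Spec_capitalize_name; infer_instance

-- ===== CLAIM (what is proved, stated in full; the proofs are below) =====
def Claim_equal_capitalize_name : Prop := ∀ (name : String), Dom_capitalize_name name → Spec_capitalize_name name (capitalize_name name)

-- ===== LEMMAS AND PROOFS =====

-- A's rendering of a finished word list: capitalize each word, join with single spaces
def JW (ws : List (List Char)) : List Char := PySem.Chars.join [' '] (ws.map capWordA)

-- B's loop invariant, by cases on the at_start flag
def InvB (cur : List Char) (acc : List (List Char)) (out : List Char) : Bool → Prop
  | true => cur = [] ∧ out = JW acc.reverse ∧ (out = [] ↔ acc = [])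
  | false => cur ≠ [] ∧ out ≠ [] ∧ out = JW (acc.reverse ++ [cur.reverse])

lemma intercalate_cons₂ (x y : List Char) (ys : List (List Char)) :
    [' '].intercalate (x :: y :: ys) = x ++ [' '] ++ [' '].intercalate (y :: ys) := by
  simp [List.intercalate, List.intersperse]

lemma JW_snoc (ws : List (List Char)) (w : List Char) :
    JW (ws ++ [w]) = JW ws ++ (if ws = [] then [] else [' ']) ++ capWordA w := by
  induction ws with
  | nil => simp [JW, PySem.Chars.join, List.intercalate]
  | cons x xs ih =>
    cases xs with
    | nil =>
      simp only [JW, PySem.Chars.join, List.map_cons, List.map_nil, List.cons_append, List.nil_append, intercalate_cons₂]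
      simp [List.intercalate]
    | cons y ys =>
      simp only [JW, PySem.Chars.join, List.map_cons, List.map_nil, List.map_append,
        List.cons_append, intercalate_cons₂] at ih ⊢
      simp only [ih]
      simp

lemma capWordA_snoc (w : List Char) (c : Char) (hw : w ≠ []) :
    capWordA (w ++ [c]) = capWordA w ++ [tuLower c] := by
  cases w with
  | nil => exact absurd rfl hw
  | cons a t => simp [capWordA]

-- the fused scan renders exactly A's split-and-capitalize words
lemma loop_go : ∀ (s cur : List Char) (acc : List (List Char)) (out : List Char) (atStart : Bool),
    InvB cur acc out atStart →
    (s.foldl stepB (out, atStart)).1 = JW (PySem.Chars.split₀.go s cur acc) := by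
  intro s
  induction s with
  | nil =>
    intro cur acc out atStart hinv
    cases atStart with
    | true =>
      obtain ⟨hc, ho, _⟩ := hinv
      simp [PySem.Chars.split₀.go, hc, ho]
    | false =>
      obtain ⟨hc, _, ho⟩ := hinv
      simp [PySem.Chars.split₀.go, List.isEmpty_iff, hc, ho]
  | cons c rest ih =>
    intro cur acc out atStart hinv
    simp only [List.foldl_cons, PySem.Chars.split₀.go]
    by_cases hsp : PySem.Chars.isspace c = true
    · rw [if_pos hsp]
      cases atStart with
      | true =>
        obtain ⟨hc, ho, hiff⟩ := hinv
        rw [if_pos (by simp [hc])]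
        refine Eq.trans ?_ (ih [] acc out true ⟨rfl, ho, hiff⟩)
        simp [stepB, hsp]
      | false =>
        obtain ⟨hc, hne, ho⟩ := hinv
        rw [if_neg (by simp [List.isEmpty_iff, hc])]
        refine Eq.trans ?_ (ih [] (cur.reverse :: acc) out true
          ⟨rfl, by simpa using ho, ⟨fun h => absurd h hne, by simp⟩⟩)
        simp [stepB, hsp]
    · rw [if_neg hsp]
      cases atStart with
      | true =>
        obtain ⟨hc, ho, hiff⟩ := hinv
        have hstep : stepB (out, true) c
            = ((if !out.isEmpty then out ++ [' '] else out) ++ [tuUpper c], false) := by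
          simp [stepB, hsp]
        rw [hstep]
        refine ih (c :: cur) acc _ false ⟨by simp, by simp, ?_⟩
        show (if !out.isEmpty then out ++ [' '] else out) ++ [tuUpper c]
            = JW (acc.reverse ++ [(c :: cur).reverse])
        subst hc
        simp only [List.reverse_cons, List.reverse_nil, List.nil_append, JW_snoc]
        by_cases hacc : acc = []
        · subst hacc
          have : out = [] := hiff.mpr rfl
          simp [this, capWordA, JW]
        · have hout : out ≠ [] := fun h => hacc (hiff.mp h)
          rw [if_pos (by simp [hout]),
              if_neg (by simpa using hacc), ho]
          simp [capWordA]
      | false =>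
        obtain ⟨hc, hne, ho⟩ := hinv
        have hstep : stepB (out, false) c = (out ++ [tuLower c], false) := by
          simp [stepB, hsp]
        rw [hstep]
        refine ih (c :: cur) acc _ false ⟨by simp, by simp, ?_⟩
        show out ++ [tuLower c] = JW (acc.reverse ++ [(c :: cur).reverse])
        simp only [List.reverse_cons]
        rw [JW_snoc, capWordA_snoc _ _ (by simpa using hc), ho, JW_snoc]
        simp

-- ===== VERDICT (by name: the statement is the Claim_ definition above) =====
theorem capitalize_name_spec : Claim_equal_capitalize_name := by
  intro name _
  unfold Spec_capitalize_name capitalize_name capitalize_name_alt PySem.Chars.split₀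
  rw [loop_go name.toList [] [] [] true ⟨rfl, rfl, by simp⟩]
  rfl
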